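-- pv_equiv track=rewrite | github.com/alu0101124896/Advent-of-Code | 2020/Day-16/main.py | getDepartureValues
-- ===== SOURCE A (Python) =====
-- def getDepartureValues(yourTicket: list, fieldsOrder: dict):
--   departureValues = [
--       value for value in yourTicket if yourTicket.index(value) in [
--           index for (fieldName, index) in fieldsOrder.items()
--           if fieldName.startswith("departure")
--       ]
--   ]
--
--   return departureValues
-- ===== SOURCE B (Python) =====
-- def getDepartureValues(yourTicket: list, fieldsOrder: dict):
--   departureIndices = {index for fieldName, index in fieldsOrder.items()
--                       if fieldName.startswith("departure")}
--   return [value for index, value in enumerate(yourTicket)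
--           if index in departureIndices]
-- ===== Notes on version B (the rewrite author's own statement) =====
-- stated objective: simpler
-- what changed: B builds the set of departure indices once and returns the values sitting at those positions via enumerate, instead of A's per-element .index() rescan plus a rebuilt index list for every ticket value.
-- intended difference: On tickets containing a duplicated value whose occurrence positions straddle the departure/non-departure boundary, A includes or excludes every occurrence according to the FIRST occurrence's position (e.g. ticket [7,7] with departure index 0 gives [7,7]), while B returns exactly the values at the departure positions ([7]), which is the intended 'collect the departure-field values'. — e.g. on getDepartureValues([7, 7], [("departure a", 0)]): A returns [7, 7], B returns [7]
import Mathlib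
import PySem

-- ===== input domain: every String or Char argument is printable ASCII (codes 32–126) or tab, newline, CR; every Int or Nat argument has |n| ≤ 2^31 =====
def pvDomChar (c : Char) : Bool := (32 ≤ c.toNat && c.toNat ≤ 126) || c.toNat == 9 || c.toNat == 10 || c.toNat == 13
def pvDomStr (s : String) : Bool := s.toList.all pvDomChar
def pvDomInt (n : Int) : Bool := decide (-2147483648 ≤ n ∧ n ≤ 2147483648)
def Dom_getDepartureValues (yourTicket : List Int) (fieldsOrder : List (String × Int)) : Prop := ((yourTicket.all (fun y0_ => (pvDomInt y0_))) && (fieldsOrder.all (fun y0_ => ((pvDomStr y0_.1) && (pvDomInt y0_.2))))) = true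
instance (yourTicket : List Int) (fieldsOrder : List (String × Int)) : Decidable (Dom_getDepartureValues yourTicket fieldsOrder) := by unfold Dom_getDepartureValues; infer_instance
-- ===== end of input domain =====

-- B simply collects the ticket values sitting at the departure positions (one pass over
-- fieldsOrder building the index set, one pass over the ticket); A instead decides each value
-- by the departure-status of its FIRST occurrence (via .index), so on tickets with duplicates
-- straddling a departure position the two differ and B's value is the intended one (see D_).

-- the departure indices, in dict iteration order (the inner comprehension of A / the set
-- comprehension of B, before set construction); also used by D_ to describe the inputs
def pvDepIdx (fieldsOrder : List (String × Int)) : List Int :=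
  ((PySem.Dict.ofList fieldsOrder).items.filter
      (fun p => PySem.Str.startswith p.1 "departure")).map (fun p => p.2)

-- ===== PORT A =====
def getDepartureValues (yourTicket : List Int) (fieldsOrder : List (String × Int)) : List Int :=
  yourTicket.filter (fun value =>
    match PySem.List.index? yourTicket value with
    | some i => (pvDepIdx fieldsOrder).contains (i : Int)
    | none => false)   -- unreachable: value is drawn from yourTicket

-- ===== PORT B =====
def getDepartureValues_alt (yourTicket : List Int) (fieldsOrder : List (String × Int)) : List Int :=
  let departureIndices : PySem.Set Int := PySem.Set.ofList (pvDepIdx fieldsOrder)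
  ((PySem.List.enumerate yourTicket).filter
      (fun p => PySem.Set.contains departureIndices p.1)).map (fun p => p.2)

-- ===== PRECONDITION & SPEC =====
-- On tickets where some position's departure-status differs from that of its value's first
-- occurrence, A includes/excludes every occurrence of the value according to the FIRST
-- occurrence only (e.g. [7,7] with departure index 0 gives A [7,7]), while B returns exactly
-- the values at the departure positions ([7]), which is the intended result.
def D_getDepartureValues (yourTicket : List Int) (fieldsOrder : List (String × Int)) : Prop :=
  ((List.range yourTicket.length).any (fun k =>
      (pvDepIdx fieldsOrder).contains ((k : Nat) : Int)
        != (pvDepIdx fieldsOrder).contains ((yourTicket.idxOf (yourTicket.getD k 0) : Nat) : Int))) = true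
instance (yourTicket : List Int) (fieldsOrder : List (String × Int)) : Decidable (D_getDepartureValues yourTicket fieldsOrder) := by unfold D_getDepartureValues; infer_instance

def Spec_getDepartureValues (yourTicket : List Int) (fieldsOrder : List (String × Int)) (out : List Int) : Prop := ¬ D_getDepartureValues yourTicket fieldsOrder → out = getDepartureValues_alt yourTicket fieldsOrder
instance (yourTicket : List Int) (fieldsOrder : List (String × Int)) (out : List Int) : Decidable (Spec_getDepartureValues yourTicket fieldsOrder out) := by unfold Spec_getDepartureValues; infer_instance

def pvDiffWitness_getDepartureValues : List Int × (List (String × Int)) := ([7, 7], [("departure a", 0)])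
def pvDiffWitnessOut_getDepartureValues : (List Int) × (List Int) := ([7, 7], [7])

-- ===== CLAIM (what is proved, stated in full; the proofs are below) =====
def Claim_unchanged_getDepartureValues : Prop := ∀ (yourTicket : List Int) (fieldsOrder : List (String × Int)), Dom_getDepartureValues yourTicket fieldsOrder → Spec_getDepartureValues yourTicket fieldsOrder (getDepartureValues yourTicket fieldsOrder)
def Claim_changed_getDepartureValues : Prop := Dom_getDepartureValues (pvDiffWitness_getDepartureValues.1) (pvDiffWitness_getDepartureValues.2) ∧ D_getDepartureValues (pvDiffWitness_getDepartureValues.1) (pvDiffWitness_getDepartureValues.2) ∧ getDepartureValues (pvDiffWitness_getDepartureValues.1) (pvDiffWitness_getDepartureValues.2) = pvDiffWitnessOut_getDepartureValues.1 ∧ getDepartureValues_alt (pvDiffWitness_getDepartureValues.1) (pvDiffWitness_getDepartureValues.2) = pvDiffWitnessOut_getDepartureValues.2 ∧ pvDiffWitnessOut_getDepartureValues.1 ≠ pvDiffWitnessOut_getDepartureValues.2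
def Claim_exact_getDepartureValues : Prop := ∀ (yourTicket : List Int) (fieldsOrder : List (String × Int)), Dom_getDepartureValues yourTicket fieldsOrder → D_getDepartureValues yourTicket fieldsOrder → getDepartureValues yourTicket fieldsOrder ≠ getDepartureValues_alt yourTicket fieldsOrder

-- ===== LEMMAS AND PROOFS =====

-- A filters the ticket by the departure-status of each value's FIRST occurrence
theorem A_char (t : List Int) (fo : List (String × Int)) :
    getDepartureValues t fo =
      t.filter (fun v => (pvDepIdx fo).contains ((t.idxOf v : Nat) : Int)) := by
  unfold getDepartureValues
  apply List.filter_congr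
  intro v hv
  rcases hk : PySem.List.index? t v with _ | k
  · rw [PySem.List.index?_eq_idxOf?, List.idxOf?_eq_none_iff] at hk
    exact absurd hv hk
  · have h2 : t.idxOf v = k := by
      rw [PySem.List.index?_eq_idxOf?] at hk
      have h3 := List.idxOf_eq_getD_idxOf? (a := v) (l := t)
      rw [hk] at h3
      simpa using h3
    simp [h2]

-- the Set membership test of B is the list membership test of pvDepIdx
theorem setContains_eq (l : List Int) (x : Int) :
    PySem.Set.contains (PySem.Set.ofList l) x = l.contains x := by
  rw [Bool.eq_iff_iff, PySem.Set.contains_iff, PySem.Set.mem_ofList, List.contains_iff_mem]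

-- B's enumerate-filter equals a plain value filter whenever the index test agrees with the
-- value test at every position
theorem enum_filter_eq (f g : Int → Bool) :
    ∀ (xs : List Int) (s : Int), (∀ (k : Nat) (_ : k < xs.length), f (s + (k : Int)) = g xs[k]) →
      ((PySem.List.enumerate xs s).filter (fun p => f p.1)).map (fun p => p.2) = xs.filter g := by
  intro xs
  induction xs with
  | nil => intro s _; simp [PySem.List.enumerate_nil]
  | cons x xs ih =>
    intro s h
    rw [PySem.List.enumerate_cons, List.filter_cons]
    have h0 : f s = g x := by
      have := h 0 (by simp)
      simpa using this
    have hrest := ih (s + 1) (fun k hk => by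
      have := h (k + 1) (by simpa using Nat.succ_lt_succ hk)
      simpa [add_assoc, add_comm, add_left_comm] using this)
    rw [List.filter_cons, h0]
    by_cases hg : g x = true
    · simp [hg, hrest]
    · simp [Bool.eq_false_iff.mpr hg, hrest]

theorem countP_strict {α : Type} (p q : α → Bool) :
    ∀ (l : List α), (∀ x ∈ l, q x = true → p x = true) →
      ∀ x₀, x₀ ∈ l → p x₀ = true → q x₀ = false → l.countP q < l.countP p := by
  intro l
  induction l with
  | nil => intro _ x₀ hx; simp at hx
  | cons a l ih =>
    intro h x₀ hx hp hq
    rw [List.countP_cons, List.countP_cons]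
    rcases List.mem_cons.mp hx with rfl | hx'
    · rw [hq, hp]
      have hle : l.countP q ≤ l.countP p :=
        List.countP_mono_left (fun x hxl hqx => h x (List.mem_cons_of_mem _ hxl) hqx)
      simpa using Nat.lt_succ_of_le hle
    · have hstrict := ih (fun x hxl hqx => h x (List.mem_cons_of_mem _ hxl) hqx) x₀ hx' hp hq
      have hif : (if q a = true then 1 else 0) ≤ (if p a = true then 1 else 0) := by
        by_cases hqa : q a = true
        · rw [if_pos hqa, if_pos (h a List.mem_cons_self hqa)]
        · rw [if_neg hqa]
          exact Nat.zero_le _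
      omega

-- count of a value in B's output, as a countP over enumerate
theorem count_B (t : List Int) (fo : List (String × Int)) (v : Int) :
    (getDepartureValues_alt t fo).count v =
      (PySem.List.enumerate t).countP
        (fun p => (p.2 == v) && (pvDepIdx fo).contains p.1) := by
  unfold getDepartureValues_alt
  simp only [List.count, List.countP_map, List.countP_filter]
  apply List.countP_congr
  intro p _
  simp

theorem count_t (t : List Int) (v : Int) :
    t.count v = (PySem.List.enumerate t).countP (fun p => p.2 == v) := by
  conv_lhs => rw [← PySem.List.map_snd_enumerate t 0]
  rw [List.count, List.countP_map]
  apply List.countP_congr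
  intro p _
  simp

-- ¬D rephrased pointwise
theorem notD_pointwise (t : List Int) (fo : List (String × Int))
    (h : ¬ D_getDepartureValues t fo) :
    ∀ (k : Nat) (hk : k < t.length),
      (pvDepIdx fo).contains ((k : Nat) : Int) =
        (pvDepIdx fo).contains ((t.idxOf t[k] : Nat) : Int) := by
  intro k hk
  unfold D_getDepartureValues at h
  rw [Bool.not_eq_true, List.any_eq_false] at h
  have := h k (List.mem_range.mpr hk)
  rw [Bool.not_eq_true, bne_eq_false_iff_eq, List.getD_eq_getElem t 0 hk] at this
  exact this

-- ===== VERDICT (by name: the statement is the Claim_ definition above) =====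
theorem getDepartureValues_spec : Claim_unchanged_getDepartureValues := by
  intro t fo _ hD
  rw [A_char]
  refine (enum_filter_eq (fun i => PySem.Set.contains (PySem.Set.ofList (pvDepIdx fo)) i)
      (fun v => (pvDepIdx fo).contains ((t.idxOf v : Nat) : Int)) t 0 ?_).symm
  intro k hk
  simp only
  rw [setContains_eq]
  simpa using notD_pointwise t fo hD k hk

theorem getDepartureValues_changed : Claim_changed_getDepartureValues := by
  unfold Claim_changed_getDepartureValues; decide

theorem getDepartureValues_tight : Claim_exact_getDepartureValues := by
  intro t fo _ hD heq
  unfold D_getDepartureValues at hD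
  rw [List.any_eq_true] at hD
  obtain ⟨k, hkmem, hkne⟩ := hD
  have hk : k < t.length := List.mem_range.mp hkmem
  rw [List.getD_eq_getElem t 0 hk, bne_iff_ne] at hkne
  have hvk : (((k : Nat) : Int), t[k]) ∈ PySem.List.enumerate t := by
    rw [PySem.List.mem_enumerate_iff]
    exact ⟨k, hk, by simp⟩
  have hcnt := congrArg (List.count t[k]) heq
  rw [count_B t fo t[k], A_char] at hcnt
  by_cases hcf : (pvDepIdx fo).contains ((t.idxOf t[k] : Nat) : Int) = true
  · -- first occurrence at a departure index, position k not: B misses occurrence k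
    have hck : (pvDepIdx fo).contains ((k : Nat) : Int) = false := by
      cases h : (pvDepIdx fo).contains ((k : Nat) : Int)
      · rfl
      · exact absurd (h.trans hcf.symm) hkne
    rw [List.count_filter (by simpa using hcf), count_t t t[k]] at hcnt
    have hlt : (PySem.List.enumerate t).countP
          (fun p => (p.2 == t[k]) && (pvDepIdx fo).contains p.1) <
        (PySem.List.enumerate t).countP (fun p => p.2 == t[k]) := by
      refine countP_strict _ _ (PySem.List.enumerate t)
        (fun x _ hq => ((Bool.and_eq_true _ _).mp hq).1) (((k : Nat) : Int), t[k]) hvk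
        (by simp) ?_
      have hck' : ((k : Nat) : Int) ∉ pvDepIdx fo := by simpa using hck
      simp [hck']
    omega
  · -- first occurrence not at a departure index, position k is: A misses the value entirely
    have hck : (pvDepIdx fo).contains ((k : Nat) : Int) = true := by
      cases h : (pvDepIdx fo).contains ((k : Nat) : Int)
      · rw [Bool.not_eq_true] at hcf
        exact absurd (h.trans hcf.symm) hkne
      · rfl
    have hzero : (t.filter
        (fun v => (pvDepIdx fo).contains ((t.idxOf v : Nat) : Int))).count t[k] = 0 :=
      List.count_eq_zero.mpr (fun hmem => hcf ((List.mem_filter.mp hmem).2))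
    rw [hzero] at hcnt
    have hpos : 0 < (PySem.List.enumerate t).countP
        (fun p => (p.2 == t[k]) && (pvDepIdx fo).contains p.1) :=
      List.countP_pos_iff.mpr ⟨(((k : Nat) : Int), t[k]), hvk, by simpa using hck⟩
    omega
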